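-- pv_equiv track=rewrite | github.com/psligti/iron-rook | iron_rook/eval/fixtures/performance/n2_complexity.py | count_word_pairs
-- ===== SOURCE A (Python) =====
-- from typing import List, Dict, Any
--
-- def count_word_pairs(texts: List[str]) -> Dict[str, int]:
--     """
--     Count all word pairs across texts.
--     COMPLEXITY: O(n² × m) where n = number of texts, m = words per text
--     """
--     pairs = {}
--     for i, text1 in enumerate(texts):
--         words1 = text1.split()
--         for j, text2 in enumerate(texts):
--             if i >= j:
--                 continue
--             words2 = text2.split()
--             for w1 in words1:
--                 for w2 in words2:
--                     pair = f"{w1},{w2}"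
--                     pairs[pair] = pairs.get(pair, 0) + 1
--     return pairs
-- ===== SOURCE B (Python) =====
-- def count_word_pairs(texts):
--     # Split each text once and collapse duplicate words into per-text count dicts;
--     # each ordered (i, j) block then adds count products over distinct words only.
--     word_counts = []
--     for t in texts:
--         c = {}
--         for w in t.split():
--             c[w] = c.get(w, 0) + 1
--         word_counts.append(c)
--     pairs = {}
--     n = len(word_counts)
--     for i in range(n):
--         c1 = word_counts[i]
--         for j in range(i + 1, n):
--             c2 = word_counts[j]
--             for w1, m1 in c1.items():
--                 for w2, m2 in c2.items():
--                     key = w1 + "," + w2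
--                     pairs[key] = pairs.get(key, 0) + m1 * m2
--     return pairs
-- ===== Notes on version B (the rewrite author's own statement) =====
-- stated objective: alternative
-- what changed: B splits each text exactly once into a per-text word-count dict (A re-splits text2 inside the O(n^2) pair loop) and each ordered (i,j) text pair is processed over DISTINCT words only, adding the product of the two multiplicities per distinct word pair instead of incrementing once per occurrence pair.
import Mathlib
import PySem

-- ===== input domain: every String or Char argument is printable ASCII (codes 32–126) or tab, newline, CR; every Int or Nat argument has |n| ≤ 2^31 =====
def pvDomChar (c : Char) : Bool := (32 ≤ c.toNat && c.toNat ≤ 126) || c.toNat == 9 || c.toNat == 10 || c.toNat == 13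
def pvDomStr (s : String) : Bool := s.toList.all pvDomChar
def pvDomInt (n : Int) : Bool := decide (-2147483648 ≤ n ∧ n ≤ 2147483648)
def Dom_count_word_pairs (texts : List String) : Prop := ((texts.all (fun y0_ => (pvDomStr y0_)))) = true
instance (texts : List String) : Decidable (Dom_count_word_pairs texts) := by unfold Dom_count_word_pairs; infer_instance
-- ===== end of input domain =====

-- B splits each text once into a per-text word-count dict and processes each ordered (i,j)
-- text pair over distinct words only, adding multiplicity products (objective: alternative).

-- f"{w1},{w2}" — exact string concatenation, built on List Char
def pvKey (w1 w2 : String) : String := String.ofList (w1.toList ++ ',' :: w2.toList)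

-- ===== PORT A =====
def count_word_pairs (texts : List String) : List (String × Int) :=
  ((PySem.List.enumerate texts 0).foldl (fun pairs p =>
    let words1 := PySem.Str.split₀ p.2
    (PySem.List.enumerate texts 0).foldl (fun pairs q =>
      if p.1 ≥ q.1 then pairs else
      let words2 := PySem.Str.split₀ q.2
      words1.foldl (fun pairs w1 =>
        words2.foldl (fun pairs w2 =>
          let pair := pvKey w1 w2
          pairs.insert pair (pairs.getD pair 0 + 1)) pairs) pairs) pairs)
    PySem.Dict.empty).items

-- ===== PORT B =====
-- c = {}; for w in t.split(): c[w] = c.get(w, 0) + 1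
def pvWordCounter (t : String) : PySem.Dict String Int :=
  (PySem.Str.split₀ t).foldl (fun c w => c.insert w (c.getD w 0 + 1)) PySem.Dict.empty

def count_word_pairs_alt (texts : List String) : List (String × Int) :=
  let wcs := texts.map pvWordCounter
  let n : Int := wcs.length
  ((PySem.List.pyRange 0 n 1).foldl (fun pairs i =>
    let c1 := PySem.List.pyGetD wcs i PySem.Dict.empty
    (PySem.List.pyRange (i + 1) n 1).foldl (fun pairs j =>
      let c2 := PySem.List.pyGetD wcs j PySem.Dict.empty
      c1.items.foldl (fun pairs p1 =>
        c2.items.foldl (fun pairs p2 =>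
          let key := pvKey p1.1 p2.1
          pairs.insert key (pairs.getD key 0 + p1.2 * p2.2)) pairs) pairs) pairs)
    PySem.Dict.empty).items

-- ===== PRECONDITION & SPEC =====
def Spec_count_word_pairs (texts : List String) (out : List (String × Int)) : Prop := out = count_word_pairs_alt texts
instance (texts : List String) (out : List (String × Int)) : Decidable (Spec_count_word_pairs texts out) := by unfold Spec_count_word_pairs; infer_instance

-- ===== CLAIM (what is proved, stated in full; the proofs are below) =====
def Claim_equal_count_word_pairs : Prop := ∀ (texts : List String), Dom_count_word_pairs texts → Spec_count_word_pairs texts (count_word_pairs texts)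

-- ===== LEMMAS AND PROOFS =====

-- One "pairs[k] = pairs.get(k, 0) + v" update
def pvStep (d : PySem.Dict String Int) (p : String × Int) : PySem.Dict String Int :=
  d.insert p.1 (d.getD p.1 0 + p.2)

def pvFold (d : PySem.Dict String Int) (ops : List (String × Int)) : PySem.Dict String Int :=
  ops.foldl pvStep d

def pvSum (k : String) (ops : List (String × Int)) : Int :=
  ((ops.filter (fun p => p.1 == k)).map (·.2)).sum

def pvBlockA (ws1 ws2 : List String) : List (String × Int) :=
  ws1.flatMap (fun a => ws2.map (fun b => (pvKey a b, (1 : Int))))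

def pvBlockB (c1 c2 : PySem.Dict String Int) : List (String × Int) :=
  c1.items.flatMap (fun p => c2.items.map (fun q => (pvKey p.1 q.1, p.2 * q.2)))

def pvOpsA (texts : List String) : List (String × Int) :=
  (PySem.List.enumerate texts 0).flatMap (fun p =>
    (PySem.List.enumerate texts 0).flatMap (fun q =>
      if p.1 ≥ q.1 then [] else pvBlockA (PySem.Str.split₀ p.2) (PySem.Str.split₀ q.2)))

def pvOpsB (texts : List String) : List (String × Int) :=
  let wcs := texts.map pvWordCounter
  let n : Int := wcs.length
  (PySem.List.pyRange 0 n 1).flatMap (fun i =>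
    (PySem.List.pyRange (i + 1) n 1).flatMap (fun j =>
      pvBlockB (PySem.List.pyGetD wcs i PySem.Dict.empty) (PySem.List.pyGetD wcs j PySem.Dict.empty)))

theorem pvFold_append (d : PySem.Dict String Int) (l1 l2 : List (String × Int)) :
    pvFold d (l1 ++ l2) = pvFold (pvFold d l1) l2 := List.foldl_append ..

theorem pvFold_flatMap {γ : Type} (d : PySem.Dict String Int) (l : List γ) (g : γ → List (String × Int)) :
    pvFold d (l.flatMap g) = l.foldl (fun d x => pvFold d (g x)) d := by
  induction l generalizing d with
  | nil => rfl
  | cons x xs ih => simp [List.flatMap_cons, pvFold_append, List.foldl_cons, ih]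

theorem pvFold_ite (c : Prop) [Decidable c] (d : PySem.Dict String Int) (L : List (String × Int)) :
    pvFold d (if c then [] else L) = if c then d else pvFold d L := by
  split <;> rfl

theorem pvA_eq (texts : List String) : count_word_pairs texts = (pvFold PySem.Dict.empty (pvOpsA texts)).items := by
  unfold count_word_pairs pvOpsA
  simp only [pvFold_flatMap, pvBlockA, pvFold_ite]
  simp only [pvFold, List.foldl_map, pvStep]

theorem pvB_eq (texts : List String) : count_word_pairs_alt texts = (pvFold PySem.Dict.empty (pvOpsB texts)).items := by
  unfold count_word_pairs_alt pvOpsB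
  simp only [pvFold_flatMap, pvBlockB]
  simp only [pvFold, List.foldl_map, pvStep]

theorem pvFold_getD (ops : List (String × Int)) (d : PySem.Dict String Int) (k : String) :
    (pvFold d ops).getD k 0 = d.getD k 0 + pvSum k ops := by
  induction ops generalizing d with
  | nil => simp [pvFold, pvSum]
  | cons p ops ih =>
      rw [pvFold, List.foldl_cons, ← pvFold, ih, pvStep, PySem.Dict.getD_insert]
      by_cases h : k = p.1
      · subst h; simp [pvSum]; ring
      · simp [pvSum, h, Ne.symm h]

theorem pvFold_keys (ops : List (String × Int)) (d : PySem.Dict String Int) :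
    (pvFold d ops).keys = PySem.Set.update d.keys (ops.map (·.1)) :=
  PySem.Dict.keys_foldl_insert_key ops Prod.fst (fun d p => d.getD p.1 0 + p.2) d

theorem pvFold_nodup (ops : List (String × Int)) :
    (pvFold PySem.Dict.empty ops).keys.Nodup :=
  PySem.Dict.nodup_keys_foldl_insert_key ops Prod.fst _ _ (by simp)

theorem pvFold_items (ops : List (String × Int)) :
    (pvFold PySem.Dict.empty ops).items
      = (PySem.Set.ofList (ops.map (·.1))).map (fun k => (k, pvSum k ops)) := by
  rw [PySem.Dict.items_eq_map_keys _ (pvFold_nodup ops) 0, pvFold_keys]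
  simp only [PySem.Dict.keys_empty, PySem.Set.update_nil_left]
  exact List.map_congr_left (fun k _ => by rw [pvFold_getD]; simp)

-- update s l only depends on s and set(l)
theorem pvUpdate_congr {s l1 l2 : List String} (h : PySem.Set.ofList l1 = PySem.Set.ofList l2) :
    PySem.Set.update s l1 = PySem.Set.update s l2 := by
  rw [PySem.Set.update_eq_append_filter, PySem.Set.update_eq_append_filter, h]

theorem pvUpdate_absorb {s l : List String} (h : ∀ x ∈ l, x ∈ s) :
    PySem.Set.update s l = s := by
  rw [PySem.Set.update_eq_append_filter]
  have hnil : List.filter (fun y => !PySem.Set.contains s y) (PySem.Set.ofList l) = [] := by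
    rw [List.filter_eq_nil_iff]
    intro a ha
    simp only [Bool.not_eq_eq_eq_not, Bool.not_true, PySem.Set.contains_eq_listContains,
      List.contains_eq_mem, decide_eq_false_iff_not, Decidable.not_not]
    exact h a (by simpa [PySem.Set.mem_ofList] using ha)
  rw [hnil, List.append_nil]

-- set() of a nested loop is unchanged by collapsing the outer list to its distinct elements
theorem pvUpdate_flatMap_ofList (s : List String) (l : List String) (f : String → List String) :
    PySem.Set.update s ((PySem.Set.ofList l).flatMap f) = PySem.Set.update s (l.flatMap f) := by
  induction l using List.reverseRecOn with
  | nil => rfl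
  | append_singleton xs x ih =>
      rw [PySem.Set.ofList_append_singleton, List.flatMap_append, List.flatMap_singleton,
        PySem.Set.update_append]
      by_cases hx : x ∈ PySem.Set.ofList xs
      · rw [PySem.Set.add_of_mem hx, ih]
        refine (pvUpdate_absorb (fun y hy => ?_)).symm
        have hxl : x ∈ xs := by simpa [PySem.Set.mem_ofList] using hx
        exact (PySem.Set.mem_update _ _ _).2 (Or.inr (List.mem_flatMap.2 ⟨x, hxl, hy⟩))
      · rw [PySem.Set.add_of_not_mem hx, List.flatMap_append, List.flatMap_singleton,
          PySem.Set.update_append, ih]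

theorem pvOfList_flatMap_ofList (l : List String) (f : String → List String) :
    PySem.Set.ofList ((PySem.Set.ofList l).flatMap f) = PySem.Set.ofList (l.flatMap f) := by
  simpa [PySem.Set.update_nil_left] using pvUpdate_flatMap_ofList [] l f

-- blockwise congruence for set() of a flatMap
theorem pvUpdate_flatMap_congr {γ : Type} (s : List String) (l : List γ) (f g : γ → List String)
    (h : ∀ x ∈ l, PySem.Set.ofList (f x) = PySem.Set.ofList (g x)) :
    PySem.Set.update s (l.flatMap f) = PySem.Set.update s (l.flatMap g) := by
  induction l generalizing s with
  | nil => rfl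
  | cons x xs ih =>
      rw [List.flatMap_cons, List.flatMap_cons, PySem.Set.update_append, PySem.Set.update_append,
        pvUpdate_congr (h x (by simp)), ih _ (fun y hy => h y (by simp [hy]))]

theorem pvOfList_flatMap_congr {γ : Type} (l : List γ) (f g : γ → List String)
    (h : ∀ x ∈ l, PySem.Set.ofList (f x) = PySem.Set.ofList (g x)) :
    PySem.Set.ofList (l.flatMap f) = PySem.Set.ofList (l.flatMap g) := by
  simpa [PySem.Set.update_nil_left] using pvUpdate_flatMap_congr [] l f g h

-- sum over a list = sum over its distinct elements weighted by multiplicity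
theorem pvSum_dedup {α : Type} [DecidableEq α] (l : List α) (g : α → Int) :
    (l.map g).sum = ((PySem.Set.ofList l).map (fun x => (l.count x : Int) * g x)).sum := by
  rw [Finset.sum_list_map_count, ← List.sum_toFinset _ (PySem.Set.nodup_ofList l)]
  rw [show (PySem.Set.ofList l).toFinset = l.toFinset by ext a; simp [PySem.Set.mem_ofList]]
  exact Finset.sum_congr rfl (fun m _ => by rw [nsmul_eq_mul])

theorem pvOfList_map_ofList (l : List String) (f : String → String) :
    PySem.Set.ofList (l.map f) = PySem.Set.ofList ((PySem.Set.ofList l).map f) := by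
  rw [List.map_eq_flatMap, List.map_eq_flatMap]
  exact (pvOfList_flatMap_ofList l (fun x => [f x])).symm

theorem pvSum_map {α : Type} (k : String) (l : List α) (f : α → String) (v : α → Int) :
    pvSum k (l.map (fun b => (f b, v b))) = (l.map (fun b => if f b = k then v b else 0)).sum := by
  induction l with
  | nil => rfl
  | cons b l ih =>
      rw [List.map_cons, List.map_cons, List.sum_cons, ← ih, pvSum, pvSum, List.filter_cons]
      by_cases h : f b = k <;> simp [h]

theorem pvSum_append (k : String) (l1 l2 : List (String × Int)) :
    pvSum k (l1 ++ l2) = pvSum k l1 + pvSum k l2 := by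
  simp [pvSum]

theorem pvSum_flatMap {γ : Type} (k : String) (l : List γ) (g : γ → List (String × Int)) :
    pvSum k (l.flatMap g) = (l.map (fun x => pvSum k (g x))).sum := by
  induction l with
  | nil => simp [pvSum]
  | cons x xs ih => simp [List.flatMap_cons, pvSum_append, ih]

-- per-(i,j)-block facts
theorem pvBlock_keys (ws1 ws2 : List String) :
    PySem.Set.ofList ((pvBlockA ws1 ws2).map (·.1))
      = PySem.Set.ofList ((pvBlockB (PySem.Dict.counter ws1) (PySem.Dict.counter ws2)).map (·.1)) := by
  have hA : (pvBlockA ws1 ws2).map (·.1) = ws1.flatMap (fun a => ws2.map (pvKey a)) := by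
    simp [pvBlockA, List.map_flatMap, Function.comp_def]
  have hB : (pvBlockB (PySem.Dict.counter ws1) (PySem.Dict.counter ws2)).map (·.1)
      = (PySem.Set.ofList ws1).flatMap (fun a => (PySem.Set.ofList ws2).map (pvKey a)) := by
    simp [pvBlockB, List.map_flatMap, PySem.Dict.items_counter, List.flatMap_map, Function.comp_def]
  rw [hA, hB, ← pvOfList_flatMap_ofList]
  exact pvOfList_flatMap_congr _ _ _ (fun a _ => pvOfList_map_ofList ws2 (pvKey a))

theorem pvBlock_sum (k : String) (ws1 ws2 : List String) :
    pvSum k (pvBlockA ws1 ws2) = pvSum k (pvBlockB (PySem.Dict.counter ws1) (PySem.Dict.counter ws2)) := by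
  rw [pvBlockA, pvBlockB, pvSum_flatMap, pvSum_flatMap,
    PySem.Dict.items_counter, PySem.Dict.items_counter, List.map_map]
  have hL : ∀ a : String, pvSum k (ws2.map (fun b => (pvKey a b, (1 : Int))))
      = ((PySem.Set.ofList ws2).map (fun b =>
          (ws2.count b : Int) * (if pvKey a b = k then (1 : Int) else 0))).sum := by
    intro a
    rw [pvSum_map k ws2 (fun b => pvKey a b) (fun _ => (1 : Int)), pvSum_dedup]
  have hR : ∀ a : String,
      ((fun p : String × Int => pvSum k (((PySem.Set.ofList ws2).map
          (fun b => (b, (ws2.count b : Int)))).map (fun q => (pvKey p.1 q.1, p.2 * q.2)))) ∘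
        (fun b => (b, (ws1.count b : Int)))) a
      = ((PySem.Set.ofList ws2).map (fun b =>
          if pvKey a b = k then (ws1.count a : Int) * (ws2.count b : Int) else 0)).sum := by
    intro a
    simp only [Function.comp_apply, List.map_map, Function.comp_def]
    rw [pvSum_map k (PySem.Set.ofList ws2)
      (fun b => pvKey a b) (fun b => (ws1.count a : Int) * (ws2.count b : Int))]
  rw [List.map_congr_left (fun a _ => hL a), pvSum_dedup,
    List.map_congr_left (fun a _ => hR a)]
  refine congrArg List.sum (List.map_congr_left (fun a _ => ?_))
  rw [← List.sum_map_mul_left]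
  refine congrArg List.sum (List.map_congr_left (fun b _ => ?_))
  by_cases h : pvKey a b = k <;> simp [h]

-- the common (i, j) skeleton of the two op streams
def pvOpsK (texts : List String) (F : String → String → List (String × Int)) : List (String × Int) :=
  (PySem.List.pyRange 0 (texts.length : Int) 1).flatMap (fun i =>
    (PySem.List.pyRange (i + 1) (texts.length : Int) 1).flatMap (fun j =>
      F (PySem.List.pyGetD texts i "") (PySem.List.pyGetD texts j "")))

theorem pvOpsA_eq (texts : List String) :
    pvOpsA texts = pvOpsK texts (fun t1 t2 => pvBlockA (PySem.Str.split₀ t1) (PySem.Str.split₀ t2)) := by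
  rw [pvOpsA, pvOpsK, PySem.List.enumerate_eq_map_pyRange texts "", List.flatMap_map]
  have hlen : PySem.List.len texts = (texts.length : Int) := by simp [PySem.List.len]
  rw [hlen]
  refine List.flatMap_congr (fun i hi => ?_)
  have hi' : 0 ≤ i ∧ i < (texts.length : Int) := by
    simpa using (PySem.List.mem_pyRange_one).1 hi
  rw [List.flatMap_map,
    PySem.List.pyRange_one_append 0 (i + 1) (texts.length : Int) (by omega) (by omega),
    List.flatMap_append]
  have h1 : (PySem.List.pyRange 0 (i + 1) 1).flatMap (fun j =>
      if i ≥ j then [] else pvBlockA (PySem.Str.split₀ (PySem.List.pyGetD texts i ""))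
        (PySem.Str.split₀ (PySem.List.pyGetD texts j ""))) = [] := by
    refine List.flatMap_eq_nil_iff.2 (fun j hj => ?_)
    have : 0 ≤ j ∧ j < i + 1 := by simpa using (PySem.List.mem_pyRange_one).1 hj
    rw [if_pos (by omega)]
  rw [h1, List.nil_append]
  refine List.flatMap_congr (fun j hj => ?_)
  have : i + 1 ≤ j ∧ j < (texts.length : Int) := by
    simpa using (PySem.List.mem_pyRange_one).1 hj
  rw [if_neg (by omega)]

theorem pvOpsB_eq (texts : List String) :
    pvOpsB texts = pvOpsK texts (fun t1 t2 =>
      pvBlockB (PySem.Dict.counter (PySem.Str.split₀ t1)) (PySem.Dict.counter (PySem.Str.split₀ t2))) := by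
  rw [pvOpsB, pvOpsK]
  simp only [List.length_map]
  simp only [show (PySem.Dict.empty : PySem.Dict String Int) = pvWordCounter "" from rfl,
    PySem.List.pyGetD_map pvWordCounter texts _ ""]
  simp only [show ∀ t, pvWordCounter t = PySem.Dict.counter (PySem.Str.split₀ t) from
    fun t => PySem.Dict.foldl_insert_getD_add_one_eq_counter _]

theorem pvOps_align (texts : List String) :
    PySem.Set.ofList ((pvOpsA texts).map (·.1)) = PySem.Set.ofList ((pvOpsB texts).map (·.1))
      ∧ ∀ k, pvSum k (pvOpsA texts) = pvSum k (pvOpsB texts) := by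
  rw [pvOpsA_eq, pvOpsB_eq, pvOpsK, pvOpsK]
  constructor
  · simp only [List.map_flatMap]
    refine pvOfList_flatMap_congr _ _ _ (fun i _ => ?_)
    refine pvOfList_flatMap_congr _ _ _ (fun j _ => ?_)
    exact pvBlock_keys _ _
  · intro k
    simp only [pvSum_flatMap]
    refine congrArg List.sum (List.map_congr_left (fun i _ => ?_))
    refine congrArg List.sum (List.map_congr_left (fun j _ => ?_))
    exact pvBlock_sum k _ _

-- ===== VERDICT (by name: the statement is the Claim_ definition above) =====
theorem count_word_pairs_spec : Claim_equal_count_word_pairs := by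
  intro texts _
  show count_word_pairs texts = count_word_pairs_alt texts
  obtain ⟨hk, hs⟩ := pvOps_align texts
  rw [pvA_eq, pvB_eq, pvFold_items, pvFold_items, hk]
  exact List.map_congr_left (fun k _ => by rw [hs k])
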